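-- pv_equiv track=rewrite | github.com/Red-Fleet/LigGen | utils.py | justifyRingCloserLabelInSmiles
-- ===== SOURCE A (Python) =====
-- def justifyRingCloserLabelInSmiles(in_smiles, reference_smiles):
--     '''return new smiles similar to in_smiles after offsetting ring labels of in_smiles,
--     offset is calculated with respect to reference_smiles'''
--
--     # finding all labels present in reference smiles
--     ref_lbs = ['']
--     for c in reference_smiles:
--         if c.isdecimal():
--             ref_lbs[-1] += c
--         else:
--             if len(ref_lbs[-1]) != 0:
--                 ref_lbs.append('')
--
--     ref_lbs = [int(e) for e in ref_lbs if e != '']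
--
--     # finding offset
--     if len(ref_lbs) == 0:
--         offset = 0
--     else:
--         offset = max(ref_lbs)
--
--     # adding offset to labels of in_smiles
--     curr = ''
--     out_smiles = ''
--     for i, c in enumerate(in_smiles):
--         if c.isdecimal():
--             curr += c
--         else:
--             if curr != '':
--                 out_smiles += str(int(curr) + offset)
--                 curr = ''
--             out_smiles += c
--     if curr != '':
--         out_smiles += str(int(curr) + offset)
--
--     return out_smiles
-- ===== SOURCE B (Python) =====
-- def _runs(s):
--     '''maximal runs of s as (is_decimal, substring) pairs, found with two index pointers'''
--     i, n, out = 0, len(s), []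
--     while i < n:
--         d = s[i].isdecimal()
--         j = i + 1
--         while j < n and s[j].isdecimal() == d:
--             j += 1
--         out.append((d, s[i:j]))
--         i = j
--     return out
--
--
-- def justifyRingCloserLabelInSmiles(in_smiles, reference_smiles):
--     '''return new smiles similar to in_smiles after offsetting ring labels of in_smiles,
--     offset is calculated with respect to reference_smiles'''
--     offset = max((int(t) for d, t in _runs(reference_smiles) if d), default=0)
--     return ''.join(str(int(t) + offset) if d else t for d, t in _runs(in_smiles))
-- ===== Notes on version B (the rewrite author's own statement) =====
-- stated objective: simpler
-- what changed: Replaces A's two char-by-char accumulator loops (a growing string buffer in one, a mutable last-element-of-list buffer in the other) with a single run-splitting pass (two index pointers producing maximal decimal/non-decimal runs) reused for both the reference maximum and the output mapping.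
import Mathlib
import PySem

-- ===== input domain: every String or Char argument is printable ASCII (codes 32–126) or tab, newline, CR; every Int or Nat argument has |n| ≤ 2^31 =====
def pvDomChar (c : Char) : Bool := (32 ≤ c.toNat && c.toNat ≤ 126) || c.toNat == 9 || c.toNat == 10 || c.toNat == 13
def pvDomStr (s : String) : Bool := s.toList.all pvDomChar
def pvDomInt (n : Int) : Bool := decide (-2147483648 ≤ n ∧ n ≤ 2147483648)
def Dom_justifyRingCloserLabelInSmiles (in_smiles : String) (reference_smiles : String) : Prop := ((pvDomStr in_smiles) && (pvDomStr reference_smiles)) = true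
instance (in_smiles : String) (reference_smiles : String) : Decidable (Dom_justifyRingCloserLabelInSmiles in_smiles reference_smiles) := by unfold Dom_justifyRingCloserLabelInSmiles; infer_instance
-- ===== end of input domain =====

-- B replaces A's two char-by-char accumulator loops with one run-splitting pass reused for
-- both the reference maximum and the output mapping (objective: simpler).
-- Note: c.isdecimal() is ported as PySem.Chars.isdigit, exact on the ASCII domain (both mean '0'..'9').

-- ===== PORT A =====
-- state of A's reference loop: the list ref_lbs of digit strings, last one still growing
def pvRefStep (acc : List (List Char)) (c : Char) : List (List Char) :=
  if PySem.Chars.isdigit c then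
    acc.dropLast ++ [acc.getLastD [] ++ [c]]          -- ref_lbs[-1] += c (acc is always nonempty)
  else
    if acc.getLastD [] ≠ [] then acc ++ [[]] else acc -- if len(ref_lbs[-1]) != 0: ref_lbs.append('')

-- state of A's output loop: (curr, out_smiles)
def pvOutStep (off : Int) (st : List Char × List Char) (c : Char) : List Char × List Char :=
  if PySem.Chars.isdigit c then (st.1 ++ [c], st.2)
  else if st.1 ≠ [] then
    ([], (st.2 ++ PySem.Int.toChars ((PySem.Int.ofChars? st.1).getD 0 + off)) ++ [c])
    -- int(curr) is exact: curr is a nonempty run of '0'..'9', so ofChars? returns some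
  else (st.1, st.2 ++ [c])

def justifyRingCloserLabelInSmiles (in_smiles : String) (reference_smiles : String) : String :=
  let ref_lbs := reference_smiles.toList.foldl pvRefStep [[]]
  let lbs : List Int := (ref_lbs.filter (· ≠ [])).map (fun e => (PySem.Int.ofChars? e).getD 0)
  -- offset = 0 if no labels else max(ref_lbs); max of a NONEMPTY list, so getD 0 is exact
  let offset : Int := if lbs.length = 0 then 0 else (PySem.List.max? lbs (fun x => x)).getD 0
  -- A's enumerate index i is unused, so the loop is a plain fold over the characters
  let st := in_smiles.toList.foldl (pvOutStep offset) ([], [])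
  String.ofList (if st.1 ≠ [] then st.2 ++ PySem.Int.toChars ((PySem.Int.ofChars? st.1).getD 0 + offset) else st.2)

-- ===== PORT B =====
-- B's _runs: maximal runs as (is_decimal, run); the inner 'while j' loop is the span of the tail
def pvRuns : List Char → List (Bool × List Char)
  | [] => []
  | c :: t =>
    let d := PySem.Chars.isdigit c
    let p := t.span (fun x => PySem.Chars.isdigit x == d)
    (d, c :: p.1) :: pvRuns p.2
termination_by l => l.length
decreasing_by
  simp [List.span_eq_takeWhile_dropWhile]
  exact List.length_dropWhile_le _ _

def justifyRingCloserLabelInSmiles_alt (in_smiles : String) (reference_smiles : String) : String :=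
  -- max(…, default=0) over the ints of the reference's decimal runs
  let offset : Int :=
    PySem.List.maxD (((pvRuns reference_smiles.toList).filter (·.1)).map
      (fun r => (PySem.Int.ofChars? r.2).getD 0)) (fun x => x) 0
  -- ''.join over the runs, offsetting the decimal ones
  String.ofList (PySem.Chars.join []
    ((pvRuns in_smiles.toList).map
      (fun r => if r.1 then PySem.Int.toChars ((PySem.Int.ofChars? r.2).getD 0 + offset) else r.2)))

-- ===== PRECONDITION & SPEC =====
def Spec_justifyRingCloserLabelInSmiles (in_smiles : String) (reference_smiles : String) (out : String) : Prop := out = justifyRingCloserLabelInSmiles_alt in_smiles reference_smiles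
instance (in_smiles : String) (reference_smiles : String) (out : String) : Decidable (Spec_justifyRingCloserLabelInSmiles in_smiles reference_smiles out) := by unfold Spec_justifyRingCloserLabelInSmiles; infer_instance

-- ===== CLAIM (what is proved, stated in full; the proofs are below) =====
def Claim_equal_justifyRingCloserLabelInSmiles : Prop := ∀ (in_smiles : String) (reference_smiles : String), Dom_justifyRingCloserLabelInSmiles in_smiles reference_smiles → Spec_justifyRingCloserLabelInSmiles in_smiles reference_smiles (justifyRingCloserLabelInSmiles in_smiles reference_smiles)

-- ===== LEMMAS AND PROOFS =====

-- abbreviations used only by the proofs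
def pvRender (off : Int) (r : Bool × List Char) : List Char :=
  if r.1 then PySem.Int.toChars ((PySem.Int.ofChars? r.2).getD 0 + off) else r.2

def pvJoinMap (off : Int) (l : List Char) : List Char :=
  PySem.Chars.join [] ((pvRuns l).map (pvRender off))

def pvInts (l : List Char) : List Int :=
  ((pvRuns l).filter (·.1)).map (fun r => (PySem.Int.ofChars? r.2).getD 0)

def pvLabels (xs : List (List Char)) : List Int :=
  (xs.filter (· ≠ [])).map (fun e => (PySem.Int.ofChars? e).getD 0)

def pvFinal (off : Int) (st : List Char × List Char) : List Char :=
  if st.1 ≠ [] then st.2 ++ PySem.Int.toChars ((PySem.Int.ofChars? st.1).getD 0 + off) else st.2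

-- ''.join concatenates
lemma pvJoin_nil_cons (x : List Char) (xs : List (List Char)) :
    PySem.Chars.join [] (x :: xs) = x ++ PySem.Chars.join [] xs := by
  cases xs with
  | nil => simp [PySem.Chars.join_singleton, PySem.Chars.join_nil]
  | cons y ys => simp [PySem.Chars.join_cons_cons]

-- runs of a nonempty all-digit list: one run
lemma pvRuns_all_digit (l : List Char) (h : ∀ x ∈ l, PySem.Chars.isdigit x = true) (hne : l ≠ []) :
    pvRuns l = [(true, l)] := by
  cases l with
  | nil => simp at hne
  | cons c t =>
    have hc : PySem.Chars.isdigit c = true := h c (by simp)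
    rw [pvRuns]
    simp only [hc, List.span_eq_takeWhile_dropWhile]
    rw [List.takeWhile_eq_self_iff.mpr (by intro x hx; simp [h x (by simp [hx])]),
        List.dropWhile_eq_nil_iff.mpr (by intro x hx; simp [h x (by simp [hx])])]
    simp [pvRuns]

-- runs of (all-digit run) ++ (non-digit :: rest): the run splits off whole
lemma pvRuns_digit_append (curr : List Char) (c : Char) (t : List Char)
    (h : ∀ x ∈ curr, PySem.Chars.isdigit x = true) (hne : curr ≠ [])
    (hc : PySem.Chars.isdigit c = false) :
    pvRuns (curr ++ c :: t) = (true, curr) :: pvRuns (c :: t) := by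
  cases curr with
  | nil => simp at hne
  | cons u us =>
    have hu : PySem.Chars.isdigit u = true := h u (by simp)
    rw [List.cons_append, pvRuns]
    simp only [hu, List.span_eq_takeWhile_dropWhile]
    rw [List.takeWhile_append_of_pos (by intro x hx; simp [h x (by simp [hx])]),
        List.dropWhile_append_of_pos (by intro x hx; simp [h x (by simp [hx])])]
    simp [hc]

-- how a leading non-digit char sits in the run decomposition
lemma pvRuns_cons_nondigit (c : Char) (t : List Char) (hc : PySem.Chars.isdigit c = false) :
    (pvRuns (c :: t) = (false, [c]) :: pvRuns t) ∨
    (∃ x t', t = x :: t' ∧ PySem.Chars.isdigit x = false ∧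
      pvRuns (c :: t) = (false, c :: x :: (t'.takeWhile (fun y => PySem.Chars.isdigit y == false))) ::
        pvRuns (t'.dropWhile (fun y => PySem.Chars.isdigit y == false)) ∧
      pvRuns t = (false, x :: (t'.takeWhile (fun y => PySem.Chars.isdigit y == false))) ::
        pvRuns (t'.dropWhile (fun y => PySem.Chars.isdigit y == false))) := by
  cases t with
  | nil =>
    left; rw [pvRuns]; simp [hc, pvRuns]
  | cons x t' =>
    cases hx : PySem.Chars.isdigit x with
    | true =>
      left; rw [pvRuns]
      simp [hc, List.span_eq_takeWhile_dropWhile, List.takeWhile, List.dropWhile, hx]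
    | false =>
      right
      refine ⟨x, t', rfl, hx, ?_, ?_⟩
      · rw [pvRuns]
        simp [hc, List.span_eq_takeWhile_dropWhile, List.takeWhile, List.dropWhile, hx]
      · rw [pvRuns]
        simp [hx, List.span_eq_takeWhile_dropWhile]

-- a leading non-digit char passes through the join unchanged
lemma pvJoinMap_cons_nondigit (off : Int) (c : Char) (t : List Char)
    (hc : PySem.Chars.isdigit c = false) :
    pvJoinMap off (c :: t) = c :: pvJoinMap off t := by
  rcases pvRuns_cons_nondigit c t hc with h | ⟨x, t', rfl, hx, h1, h2⟩
  · rw [pvJoinMap, h, List.map_cons, pvJoin_nil_cons]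
    simp [pvRender, pvJoinMap]
  · rw [pvJoinMap, h1, List.map_cons, pvJoin_nil_cons, pvJoinMap, h2, List.map_cons,
      pvJoin_nil_cons]
    simp [pvRender]

-- a leading non-digit char contributes no label
lemma pvInts_cons_nondigit (c : Char) (t : List Char) (hc : PySem.Chars.isdigit c = false) :
    pvInts (c :: t) = pvInts t := by
  rcases pvRuns_cons_nondigit c t hc with h | ⟨x, t', rfl, hx, h1, h2⟩
  · rw [pvInts, h]; simp [pvInts]
  · rw [pvInts, h1, pvInts, h2]; simp

lemma pvInts_all_digit (curr : List Char) (h : ∀ x ∈ curr, PySem.Chars.isdigit x = true) :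
    pvInts curr = if curr = [] then [] else [(PySem.Int.ofChars? curr).getD 0] := by
  by_cases hne : curr = []
  · subst hne; simp [pvInts, pvRuns]
  · simp [pvInts, pvRuns_all_digit curr h hne, hne]

lemma pvJoinMap_all_digit (off : Int) (curr : List Char)
    (h : ∀ x ∈ curr, PySem.Chars.isdigit x = true) :
    pvJoinMap off curr = pvFinal off (curr, []) := by
  by_cases hne : curr = []
  · subst hne; simp [pvJoinMap, pvRuns, PySem.Chars.join_nil, pvFinal]
  · rw [pvJoinMap, pvRuns_all_digit curr h hne]
    simp [pvFinal, hne, PySem.Chars.join_singleton, pvRender]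

-- invariant of A's output loop: pending digits flushed at the end give B's joined runs
lemma pvOut_loop (off : Int) (l curr out : List Char)
    (h : ∀ x ∈ curr, PySem.Chars.isdigit x = true) :
    pvFinal off (l.foldl (pvOutStep off) (curr, out)) = out ++ pvJoinMap off (curr ++ l) := by
  induction l generalizing curr out with
  | nil =>
    simp only [List.foldl_nil, List.append_nil]
    rw [pvJoinMap_all_digit off curr h]
    by_cases hne : curr = [] <;> simp [pvFinal, hne]
  | cons c t ih =>
    rw [List.foldl_cons]
    cases hc : PySem.Chars.isdigit c with
    | true =>
      have : pvOutStep off (curr, out) c = (curr ++ [c], out) := by simp [pvOutStep, hc]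
      rw [this, ih _ _ ?_]
      · simp [List.append_assoc]
      · intro x hx
        rcases List.mem_append.mp hx with h1 | h1
        · exact h x h1
        · simp at h1; subst h1; exact hc
    | false =>
      by_cases hne : curr = []
      · subst hne
        have : pvOutStep off (([] : List Char), out) c = ([], out ++ [c]) := by
          simp [pvOutStep, hc]
        rw [this, ih _ _ (by simp)]
        simp only [List.nil_append]
        rw [pvJoinMap_cons_nondigit off c t hc]
        simp
      · have : pvOutStep off (curr, out) c =
            ([], (out ++ PySem.Int.toChars ((PySem.Int.ofChars? curr).getD 0 + off)) ++ [c]) := by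
          simp [pvOutStep, hc, hne]
        have hr : pvJoinMap off (curr ++ c :: t) =
            pvRender off (true, curr) ++ (c :: pvJoinMap off t) := by
          rw [pvJoinMap, pvRuns_digit_append curr c t h hne hc, List.map_cons, pvJoin_nil_cons,
            ← pvJoinMap, pvJoinMap_cons_nondigit off c t hc]
        rw [this, ih _ _ (by simp), hr]
        simp [pvRender]

-- invariant of A's reference loop: the collected labels are the ints of the decimal runs
lemma pvRef_loop (l : List Char) (pre : List (List Char)) (curr : List Char)
    (h : ∀ x ∈ curr, PySem.Chars.isdigit x = true) :
    pvLabels (l.foldl pvRefStep (pre ++ [curr])) = pvLabels pre ++ pvInts (curr ++ l) := by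
  induction l generalizing pre curr with
  | nil =>
    simp only [List.foldl_nil, List.append_nil, pvInts_all_digit curr h]
    by_cases hne : curr = [] <;> simp [pvLabels, List.filter_append, hne]
  | cons c t ih =>
    rw [List.foldl_cons]
    cases hc : PySem.Chars.isdigit c with
    | true =>
      have : pvRefStep (pre ++ [curr]) c = pre ++ [curr ++ [c]] := by
        simp [pvRefStep, hc]
      rw [this, ih _ _ ?_]
      · simp [List.append_assoc]
      · intro x hx
        rcases List.mem_append.mp hx with h1 | h1
        · exact h x h1
        · simp at h1; subst h1; exact hc
    | false =>
      by_cases hne : curr = []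
      · subst hne
        have : pvRefStep (pre ++ [[]]) c = pre ++ [[]] := by simp [pvRefStep, hc]
        rw [this, ih _ _ (by simp)]
        simp only [List.nil_append]
        rw [pvInts_cons_nondigit c t hc]
      · have : pvRefStep (pre ++ [curr]) c = (pre ++ [curr]) ++ [[]] := by
          simp [pvRefStep, hc, hne]
        have hr : pvInts (curr ++ c :: t) = (PySem.Int.ofChars? curr).getD 0 :: pvInts t := by
          have h1 := pvInts_cons_nondigit c t hc
          unfold pvInts at h1 ⊢
          rw [pvRuns_digit_append curr c t h hne hc, List.filter_cons]
          simp [h1]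
        rw [this, ih _ _ (by simp), hr]
        simp [pvLabels, List.filter_append, hne]

-- ===== VERDICT (by name: the statement is the Claim_ definition above) =====
theorem justifyRingCloserLabelInSmiles_spec : Claim_equal_justifyRingCloserLabelInSmiles := by
  intro ins refs _
  unfold Spec_justifyRingCloserLabelInSmiles
  have href := pvRef_loop refs.toList [] [] (by simp)
  simp only [List.nil_append, pvLabels, List.filter_nil, List.map_nil] at href
  have hoff : ∀ (xs : List Int),
      (if xs.length = 0 then (0:Int) else (PySem.List.max? xs (fun x => x)).getD 0) =
        PySem.List.maxD xs (fun x => x) 0 := by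
    intro xs
    unfold PySem.List.maxD
    by_cases hn : xs = []
    · rw [(PySem.List.max?_eq_none_iff xs (fun x => x)).mpr hn]
      simp [hn]
    · simp [hn]
  unfold justifyRingCloserLabelInSmiles justifyRingCloserLabelInSmiles_alt
  simp only []
  rw [href]
  unfold pvInts
  rw [hoff]
  have hout := pvOut_loop (PySem.List.maxD (((pvRuns refs.toList).filter (·.1)).map
      (fun r => (PySem.Int.ofChars? r.2).getD 0)) (fun x => x) 0) ins.toList [] [] (by simp)
  simp only [List.nil_append] at hout
  unfold pvFinal pvJoinMap pvRender at hout
  rw [hout]
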